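-- pv_equiv track=rewrite | github.com/cndqjacndqja/algorithm_python | ndb769/이진탐색/page_370.py | solution
-- ===== SOURCE A (Python) =====
-- from bisect import bisect_left, bisect_right
--
-- def solution(words, queries):
--     list_words = [[] for _ in range(100001)]
--     reverse_list_words = [[] for _ in range(100001)]
--     for i in words:
--         list_words[len(i)].append(i)
--         reverse_list_words[len(i)].append(i[::-1])
--
--     for i in range(100001):
--         list_words[i].sort()
--         reverse_list_words[i].sort()
--
--     result = []
--
--     for i in queries:
--         if i[0] != '?':
--             count = bisect_count_range(list_words[len(i)], i.replace('?', 'a'), i.replace('?', 'z'))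
--         else:
--             count = bisect_count_range(reverse_list_words[len(i)], i[::-1].replace('?', 'a'), i[::-1].replace('?', 'z'))
--         result.append(count)
--     return result
--
-- def bisect_count_range(a, left, right):
--     left_word = bisect_left(a, left)
--     right_word = bisect_right(a, right)
--     return right_word - left_word
-- ===== SOURCE B (Python) =====
-- def solution(words, queries):
--     result = []
--     for q in queries:
--         n = len(q)
--         if q[0] != '?':
--             lo = q.replace('?', 'a')
--             hi = q.replace('?', 'z')
--             result.append(sum(1 for w in words if len(w) == n and lo <= w <= hi))
--         else:
--             r = q[::-1]
--             lo = r.replace('?', 'a')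
--             hi = r.replace('?', 'z')
--             result.append(sum(1 for w in words if len(w) == n and lo <= w[::-1] <= hi))
--     return result
-- ===== Notes on version B (the rewrite author's own statement) =====
-- stated objective: simpler
-- what changed: Replaced the 100001-bucket tables, per-bucket sorting and bisect range counts by a direct per-query linear scan that counts words of the query's length lying between q.replace('?','a') and q.replace('?','z') (comparing reversed strings when the query starts with '?').
import Mathlib
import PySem

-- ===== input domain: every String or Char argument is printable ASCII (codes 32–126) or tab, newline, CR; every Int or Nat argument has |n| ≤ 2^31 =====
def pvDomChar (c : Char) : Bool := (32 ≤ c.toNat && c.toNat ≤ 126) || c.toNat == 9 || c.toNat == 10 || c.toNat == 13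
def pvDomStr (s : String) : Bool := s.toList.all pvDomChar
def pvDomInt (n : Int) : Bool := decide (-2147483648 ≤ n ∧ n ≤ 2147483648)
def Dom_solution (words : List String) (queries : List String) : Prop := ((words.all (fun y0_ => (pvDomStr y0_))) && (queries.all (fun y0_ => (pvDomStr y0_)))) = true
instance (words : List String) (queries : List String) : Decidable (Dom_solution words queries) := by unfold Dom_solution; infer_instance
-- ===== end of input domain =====

-- B replaces the 100001-bucket tables + sorting + bisect of A by a direct per-query linear
-- scan counting words of the query's length inside the replace('?','a')..replace('?','z') range
-- (on reversed strings when the query starts with '?'); objective: simpler.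

-- ===== PORT A =====
-- helper bisect_count_range; bisect_left/bisect_right are the PySem primitives
def bisectCountRange (a : List String) (left right : String) : Int :=
  let left_word := PySem.List.bisectLeft a left
  let right_word := PySem.List.bisectRight a right
  (right_word : Int) - (left_word : Int)

def solution (words : List String) (queries : List String) : List Int :=
  -- the two bucket tables are built by one pass over words (a fold over the pair of tables);
  -- list_words[len(i)].append(...) is List.modify at index len(i) (Pre_ keeps the index in range,
  -- where Python would raise IndexError); i[::-1] is PySem.Str.slice? with step -1
  let p := words.foldl
    (fun (p : List (List String) × List (List String)) i =>
      (p.1.modify i.toList.length (fun b => b ++ [i]),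
       p.2.modify i.toList.length (fun b => b ++ [(PySem.Str.slice? i none none (-1)).getD ""])))
    (List.replicate 100001 [], List.replicate 100001 [])
  -- the in-place sort loop over all 100001 buckets
  let listWords := p.1.map (fun b => PySem.List.sorted b (fun w => w) false)
  let revWords := p.2.map (fun b => PySem.List.sorted b (fun w => w) false)
  -- i[0] would raise IndexError on an empty query: Pre_ excludes that, .getD ' ' is arbitrary there
  queries.foldl (fun result i =>
    let count : Int :=
      if (PySem.Str.pyGet? i 0).getD ' ' ≠ '?' then
        bisectCountRange (listWords.getD i.toList.length [])
          (PySem.Str.replace i "?" "a") (PySem.Str.replace i "?" "z")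
      else
        bisectCountRange (revWords.getD i.toList.length [])
          (PySem.Str.replace ((PySem.Str.slice? i none none (-1)).getD "") "?" "a")
          (PySem.Str.replace ((PySem.Str.slice? i none none (-1)).getD "") "?" "z")
    result ++ [count]) []

-- ===== PORT B =====
def solution_alt (words : List String) (queries : List String) : List Int :=
  queries.map (fun q =>
    let n := q.toList.length
    if q.toList.headD ' ' ≠ '?' then
      let lo := PySem.Str.replace q "?" "a"
      let hi := PySem.Str.replace q "?" "z"
      ((words.countP (fun w =>
          w.toList.length == n && decide (lo ≤ w) && decide (w ≤ hi)) : Nat) : Int)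
    else
      let r := String.ofList q.toList.reverse
      let lo := PySem.Str.replace r "?" "a"
      let hi := PySem.Str.replace r "?" "z"
      ((words.countP (fun w =>
          w.toList.length == n && decide (lo ≤ String.ofList w.toList.reverse)
            && decide (String.ofList w.toList.reverse ≤ hi)) : Nat) : Int))

-- ===== PRECONDITION & SPEC =====
-- Pre_ excludes exactly the inputs where Python A raises IndexError: an empty query (i[0])
-- or a word/query longer than 100000 (bucket index out of range).
def Pre_solution (words : List String) (queries : List String) : Prop :=
  (∀ w ∈ words, w.toList.length ≤ 100000) ∧
  (∀ q ∈ queries, q.toList ≠ [] ∧ q.toList.length ≤ 100000)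
instance (words : List String) (queries : List String) : Decidable (Pre_solution words queries) := by
  unfold Pre_solution; infer_instance
def pvWitness_solution : List String × List String := (["ab", "zz"], ["a?", "??"])

def Spec_solution (words : List String) (queries : List String) (out : List Int) : Prop := out = solution_alt words queries
instance (words : List String) (queries : List String) (out : List Int) : Decidable (Spec_solution words queries out) := by unfold Spec_solution; infer_instance

-- ===== CLAIM (what is proved, stated in full; the proofs are below) =====
def Claim_equal_solution : Prop := ∀ (words : List String) (queries : List String), Dom_solution words queries → Pre_solution words queries → Spec_solution words queries (solution words queries)

-- ===== LEMMAS AND PROOFS =====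


theorem pv_sorted_idx_iff (p : String → Bool)
    (hmono : ∀ a b : String, a ≤ b → p b = true → p a = true) :
    ∀ (xs : List String), xs.Pairwise (· ≤ ·) →
      ∀ (j : Nat) (hj : j < xs.length), (p xs[j] = true ↔ j < xs.countP p) := by
  intro xs
  induction xs with
  | nil => intro _ j hj; simp at hj
  | cons h t ih =>
    intro hp j hj
    have hht := (List.pairwise_cons.mp hp).1
    have ht := (List.pairwise_cons.mp hp).2
    by_cases hph : p h = true
    · rw [List.countP_cons_of_pos (p := p) hph]
      match j with
      | 0 => simpa using hph
      | j+1 =>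
        have hj' : j < t.length := by simpa using hj
        simp only [List.getElem_cons_succ]
        rw [ih ht j hj']
        omega
    · have hz : t.countP p = 0 := by
        rw [List.countP_eq_zero]
        intro y hy
        exact fun hpy => hph (hmono h y (hht y hy) hpy)
      rw [List.countP_cons_of_neg (p := p) (by simpa using hph)]
      match j with
      | 0 => simp [hph, hz]
      | j+1 =>
        have hj' : j < t.length := by simpa using hj
        have hf : p t[j] = false := by
          have := List.countP_eq_zero.mp hz t[j] (List.getElem_mem hj')
          simpa using this
        simp [hf, hz]

theorem pv_blLoop_eq (xs : List String) (x : String) (hs : xs.Pairwise (· ≤ ·)) :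
    ∀ (fuel lo hi : Nat),
      lo ≤ xs.countP (fun y => decide (y < x)) →
      xs.countP (fun y => decide (y < x)) ≤ hi →
      hi ≤ xs.length → hi - lo ≤ fuel →
      PySem.List.bisectLeftLoop xs x fuel lo hi = xs.countP (fun y => decide (y < x)) := by
  have hidx := pv_sorted_idx_iff (fun y => decide (y < x))
    (fun a b hab hb => decide_eq_true (lt_of_le_of_lt hab (of_decide_eq_true hb))) xs hs
  intro fuel
  induction fuel with
  | zero => intro lo hi h1 h2 h3 h4; rw [PySem.List.bisectLeftLoop.eq_1]; omega
  | succ n ih =>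
    intro lo hi h1 h2 h3 h4
    rw [PySem.List.bisectLeftLoop.eq_2]
    by_cases hlh : lo < hi
    · rw [if_pos hlh]
      have hmid : (lo + hi) / 2 < xs.length := by omega
      rw [List.getElem?_eq_getElem hmid]
      dsimp only
      by_cases hcmp : xs[(lo + hi) / 2] < x
      · rw [if_pos hcmp]
        have : (lo + hi) / 2 < xs.countP (fun y => decide (y < x)) :=
          (hidx _ hmid).mp (decide_eq_true hcmp)
        exact ih _ _ (by omega) h2 h3 (by omega)
      · rw [if_neg hcmp]
        have : ¬ (lo + hi) / 2 < xs.countP (fun y => decide (y < x)) := by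
          intro hc
          exact hcmp (of_decide_eq_true ((hidx _ hmid).mpr hc))
        exact ih lo _ h1 (by omega) (by omega) (by omega)
    · rw [if_neg hlh]; omega

theorem pv_brLoop_eq (xs : List String) (x : String) (hs : xs.Pairwise (· ≤ ·)) :
    ∀ (fuel lo hi : Nat),
      lo ≤ xs.countP (fun y => decide (y ≤ x)) →
      xs.countP (fun y => decide (y ≤ x)) ≤ hi →
      hi ≤ xs.length → hi - lo ≤ fuel →
      PySem.List.bisectRightLoop xs x fuel lo hi = xs.countP (fun y => decide (y ≤ x)) := by
  have hidx := pv_sorted_idx_iff (fun y => decide (y ≤ x))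
    (fun a b hab hb => decide_eq_true (le_trans hab (of_decide_eq_true hb))) xs hs
  intro fuel
  induction fuel with
  | zero => intro lo hi h1 h2 h3 h4; rw [PySem.List.bisectRightLoop.eq_1]; omega
  | succ n ih =>
    intro lo hi h1 h2 h3 h4
    rw [PySem.List.bisectRightLoop.eq_2]
    by_cases hlh : lo < hi
    · rw [if_pos hlh]
      have hmid : (lo + hi) / 2 < xs.length := by omega
      rw [List.getElem?_eq_getElem hmid]
      dsimp only
      by_cases hcmp : x < xs[(lo + hi) / 2]
      · rw [if_pos hcmp]
        have : ¬ (lo + hi) / 2 < xs.countP (fun y => decide (y ≤ x)) := by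
          intro hc
          exact absurd hcmp (not_lt.mpr (of_decide_eq_true ((hidx _ hmid).mpr hc)))
        exact ih lo _ h1 (by omega) (by omega) (by omega)
      · rw [if_neg hcmp]
        have : (lo + hi) / 2 < xs.countP (fun y => decide (y ≤ x)) :=
          (hidx _ hmid).mp (decide_eq_true (not_lt.mp hcmp))
        exact ih _ _ (by omega) h2 h3 (by omega)
    · rw [if_neg hlh]; omega

theorem pv_countP_sandwich (lo hi : String) (hlh : lo ≤ hi) (l : List String) :
    l.countP (fun y => decide (y ≤ hi))
      = l.countP (fun y => decide (y < lo))
        + l.countP (fun y => decide (lo ≤ y) && decide (y ≤ hi)) := by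
  induction l with
  | nil => simp
  | cons h t ih =>
    simp only [List.countP_cons, ih]
    by_cases h1 : h < lo
    · have h2 : h ≤ hi := le_trans (le_of_lt h1) hlh
      simp [h1, h2, not_le.mpr h1]
      omega
    · have h2 : lo ≤ h := not_lt.mp h1
      by_cases h3 : h ≤ hi
      · simp [h1, h2, h3]
        omega
      · simp [h1, h2, h3]

theorem pv_bisectCount (b : List String) (lo hi : String) (hlh : lo ≤ hi) :
    ((PySem.List.bisectRight (PySem.List.sorted b (fun w => w) false) hi : Int)
      - (PySem.List.bisectLeft (PySem.List.sorted b (fun w => w) false) lo : Int))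
      = (b.countP (fun y => decide (lo ≤ y) && decide (y ≤ hi)) : Int) := by
  set s := PySem.List.sorted b (fun w => w) false with hset
  have hperm : s.Perm b := PySem.List.sorted_perm b (fun w => w) false
  have hpw : s.Pairwise (· ≤ ·) := PySem.List.sorted_pairwise b (fun w => w)
  have hR : PySem.List.bisectRight s hi = s.countP (fun y => decide (y ≤ hi)) := by
    rw [PySem.List.bisectRight]
    exact pv_brLoop_eq s hi hpw _ 0 s.length (by omega) List.countP_le_length le_rfl (by omega)
  have hL : PySem.List.bisectLeft s lo = s.countP (fun y => decide (y < lo)) := by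
    rw [PySem.List.bisectLeft]
    exact pv_blLoop_eq s lo hpw _ 0 s.length (by omega) List.countP_le_length le_rfl (by omega)
  rw [hR, hL, pv_countP_sandwich lo hi hlh s,
    hperm.countP_eq (fun y => decide (lo ≤ y) && decide (y ≤ hi))]
  push_cast
  ring

-- replace('?','a') / replace('?','z') lemmas
theorem pv_go_single (c : Char) : ∀ (fuel : Nat) (l acc : List Char), l.length ≤ fuel →
    PySem.Chars.replace.go ['?'] [c] fuel l acc
      = acc.reverse ++ l.map (fun a => if a = '?' then c else a) := by
  intro fuel
  induction fuel with
  | zero =>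
    intro l acc h
    have : l = [] := List.eq_nil_of_length_eq_zero (by omega)
    subst this
    simp [PySem.Chars.replace.go]
  | succ n ih =>
    intro l acc h
    match l with
    | [] => simp [PySem.Chars.replace.go]
    | a :: t =>
      simp only [PySem.Chars.replace.go]
      by_cases ha : a = '?'
      · subst ha
        rw [if_pos (by simp [List.isPrefixOf])]
        simp only [List.length_cons] at h
        simp only [List.length_cons, List.length_nil, List.drop_succ_cons, List.drop_zero]
        rw [ih t _ (by omega)]
        simp
      · rw [if_neg (by simp [List.isPrefixOf]; exact fun hh => (ha hh.symm).elim)]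
        simp only [List.length_cons] at h
        rw [ih t _ (by omega)]
        simp [ha]

theorem pv_replace_single (s : List Char) (c : Char) :
    PySem.Chars.replace s ['?'] [c] = s.map (fun a => if a = '?' then c else a) := by
  rw [PySem.Chars.replace]
  rw [if_neg (by decide)]
  rw [pv_go_single c s.length s [] le_rfl]
  simp

theorem pv_map_le (cs : List Char) (f g : Char → Char) (h : ∀ c, f c ≤ g c) :
    @LE.le _ List.LE' (cs.map f) (cs.map g) := by
  induction cs with
  | nil => simp
  | cons c t ih =>
    simp only [List.map_cons]
    rcases lt_or_eq_of_le (h c) with hlt | heq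
    · exact le_of_lt (by rw [List.cons_lt_cons_iff]; exact Or.inl hlt)
    · rw [heq]
      rcases lt_or_eq_of_le ih with hlt | heq2
      · exact le_of_lt (by rw [List.cons_lt_cons_iff]; exact Or.inr ⟨rfl, hlt⟩)
      · rw [heq2]

theorem pv_replace_le (q : String) :
    PySem.Str.replace q "?" "a" ≤ PySem.Str.replace q "?" "z" := by
  rw [String.le_iff_toList_le, PySem.Str.toList_replace, PySem.Str.toList_replace]
  have h1 : "?".toList = ['?'] := rfl
  have h2 : "a".toList = ['a'] := rfl
  have h3 : "z".toList = ['z'] := rfl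
  rw [h1, h2, h3, pv_replace_single, pv_replace_single]
  apply pv_map_le
  intro c
  by_cases hc : c = '?'
  · simp [hc]
  · simp [hc]

-- bucket construction
theorem pv_foldl_modify_length (st : String → String) :
    ∀ (ws : List String) (b : List (List String)),
      (ws.foldl (fun bb i => bb.modify i.toList.length (fun x => x ++ [st i])) b).length
        = b.length := by
  intro ws
  induction ws with
  | nil => intro b; rfl
  | cons w t ih => intro b; rw [List.foldl_cons, ih, List.length_modify]

theorem pv_buckets (st : String → String) :
    ∀ (ws : List String) (b : List (List String)),
      (∀ w ∈ ws, w.toList.length < b.length) → ∀ L, L < b.length →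
      (ws.foldl (fun bb i => bb.modify i.toList.length (fun x => x ++ [st i])) b).getD L []
        = b.getD L [] ++ (ws.filter (fun w => w.toList.length == L)).map st := by
  intro ws
  induction ws with
  | nil => intro b _ L hL; simp
  | cons w t ih =>
    intro b hw L hL
    rw [List.foldl_cons]
    have hwb : w.toList.length < b.length := hw w (List.mem_cons_self ..)
    have hlenmod : (b.modify w.toList.length (fun x => x ++ [st w])).length = b.length :=
      List.length_modify ..
    rw [ih (b.modify w.toList.length (fun x => x ++ [st w]))
        (fun y hy => by rw [hlenmod]; exact hw y (List.mem_cons_of_mem _ hy))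
        L (by omega)]
    have hmod : (b.modify w.toList.length (fun x => x ++ [st w])).getD L []
        = if w.toList.length = L then b.getD L [] ++ [st w] else b.getD L [] := by
      rw [List.getD_eq_getElem _ _ (by omega), List.getD_eq_getElem _ _ hL,
        List.getElem_modify]
    rw [hmod, List.filter_cons]
    by_cases hwl : w.toList.length = L
    · rw [if_pos hwl, if_pos (by simpa using hwl)]
      simp
    · rw [if_neg hwl, if_neg (by simpa using hwl)]

theorem pv_getD_map_sorted (p1 : List (List String)) (L : Nat) (hL : L < p1.length) :
    ((p1.map (fun b => PySem.List.sorted b (fun w => w) false)).getD L [])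
      = PySem.List.sorted (p1.getD L []) (fun w => w) false := by
  rw [List.getD_eq_getElem _ _ (by simpa using hL), List.getD_eq_getElem _ _ hL,
    List.getElem_map]

-- ===== VERDICT (by name: the statement is the Claim_ definition above) =====
theorem solution_spec : Claim_equal_solution := by
  intro words queries _hdom hpre
  obtain ⟨hw, hq⟩ := hpre
  unfold Spec_solution solution solution_alt
  dsimp only
  rw [show (List.foldl
        (fun (p : List (List String) × List (List String)) i =>
          (p.1.modify i.toList.length fun b => b ++ [i],
           p.2.modify i.toList.length fun b => b ++ [(PySem.Str.slice? i none none (-1)).getD ""]))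
        (List.replicate 100001 [], List.replicate 100001 []) words)
      = (List.foldl (fun bb i => bb.modify i.toList.length fun x => x ++ [i])
           (List.replicate 100001 []) words,
         List.foldl (fun bb i => bb.modify i.toList.length
             fun x => x ++ [(PySem.Str.slice? i none none (-1)).getD ""])
           (List.replicate 100001 []) words)
    from PySem.List.foldl_prod_mk
      (fun bb i => bb.modify i.toList.length fun x => x ++ [i])
      (fun bb i => bb.modify i.toList.length
        fun x => x ++ [(PySem.Str.slice? i none none (-1)).getD ""])
      words (List.replicate 100001 []) (List.replicate 100001 [])]
  rw [PySem.List.foldl_append_singleton_eq_map, List.nil_append]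
  apply List.map_congr_left
  intro q hqmem
  obtain ⟨hq0, hql⟩ := hq q hqmem
  obtain ⟨c, t, hct⟩ := List.exists_cons_of_ne_nil hq0
  -- shared abbreviations
  have hrev : ∀ s : String, (PySem.Str.slice? s none none (-1)).getD ""
      = String.ofList s.toList.reverse := by
    intro s; rw [PySem.Str.slice?_none_none_neg_one]; rfl
  have hw' : ∀ w ∈ words, w.toList.length < (100001 : Nat) := fun w hm => by
    have := hw w hm; omega
  have hL : q.toList.length < (100001 : Nat) := by omega
  have hhead : (PySem.Str.pyGet? q 0).getD ' ' = c := by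
    have h0 : PySem.Str.pyGet? q 0 = q.toList[(0:Nat)]? := by
      rw [show (0:Int) = ((0:Nat):Int) from rfl, PySem.Str.pyGet?_natCast]
    rw [h0, hct]
    rfl
  have hheadB : q.toList.headD ' ' = c := by rw [hct]; rfl
  -- bucket contents
  have hbuck : ∀ st : String → String,
      (words.foldl (fun bb i => bb.modify i.toList.length (fun x => x ++ [st i]))
        (List.replicate 100001 [])).getD q.toList.length []
      = (words.filter (fun w => w.toList.length == q.toList.length)).map st := by
    intro st
    rw [pv_buckets st words (List.replicate 100001 [])
      (fun w hm => by rw [List.length_replicate]; exact hw' w hm)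
      q.toList.length (by rw [List.length_replicate]; exact hL)]
    rw [List.getD_replicate _ hL, List.nil_append]
  have hblen : ∀ st : String → String,
      (words.foldl (fun bb i => bb.modify i.toList.length (fun x => x ++ [st i]))
        (List.replicate 100001 [])).length = 100001 := by
    intro st; rw [pv_foldl_modify_length, List.length_replicate]
  rw [hhead, hheadB]
  by_cases hc : c = '?'
  · -- query starts with '?': reversed-bucket branch in both
    rw [if_neg (by simp [hc]), if_neg (by simp [hc])]
    rw [hrev q]
    rw [pv_getD_map_sorted _ _ (by rw [hblen]; exact hL), hbuck]
    simp only [bisectCountRange]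
    rw [pv_bisectCount _ _ _ (pv_replace_le _)]
    rw [List.countP_map, List.countP_filter]
    congr 1
    apply List.countP_congr
    intro w _
    simp only [Function.comp, hrev]
    rw [(by decide : ∀ (a b c : Bool), ((a && b) && c) = ((c && a) && b))]
  · -- ordinary branch
    rw [if_pos (by simpa using hc), if_pos (by simpa using hc)]
    rw [pv_getD_map_sorted _ _ (by rw [hblen]; exact hL), hbuck]
    simp only [bisectCountRange]
    rw [pv_bisectCount _ _ _ (pv_replace_le _)]
    rw [List.map_id', List.countP_filter]
    congr 1
    apply List.countP_congr
    intro w _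
    rw [(by decide : ∀ (a b c : Bool), ((a && b) && c) = ((c && a) && b))]
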